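-- pv_equiv track=rewrite | github.com/meronrudy/openlaw | plugins/employment_law/plugin.py | _enhance_legal_analysis
-- ===== SOURCE A (Python) =====
-- from typing import List, Dict, Any, Optional
--
-- def _enhance_legal_analysis(explanation: Dict[str, Any]) -> Dict[str, Any]:
--     """
--     Enhance explanation with employment law specific analysis
--
--     Args:
--         explanation: Basic explanation structure
--
--     Returns:
--         Enhanced legal analysis
--     """
--     analysis = {
--         "applicable_statutes": [],
--         "key_requirements": [],
--         "potential_defenses": [],
--         "next_steps": []
--     }
--
--     # Extract legal authorities from explanation
--     for support in explanation.get("supports", []):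
--         authority = support.get("rule", {}).get("authority", "")
--
--         if "42 U.S.C." in authority:
--             analysis["applicable_statutes"].append("Americans with Disabilities Act (ADA)")
--             analysis["key_requirements"].append("Interactive process with employee")
--             analysis["potential_defenses"].append("Undue hardship defense")
--             analysis["next_steps"].append("Engage in interactive process to identify accommodation")
--
--         elif "29 U.S.C." in authority:
--             analysis["applicable_statutes"].append("Fair Labor Standards Act (FLSA)")
--             analysis["key_requirements"].append("Time and one-half for overtime hours")
--             analysis["potential_defenses"].append("Employee exempt classification")
--             analysis["next_steps"].append("Calculate overtime compensation owed")
--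
--     # Remove duplicates
--     for key in analysis:
--         analysis[key] = list(set(analysis[key]))
--
--     return analysis
-- ===== SOURCE B (Python) =====
-- def _enhance_legal_analysis(explanation):
--     """Two any() scans set an ADA flag and an FLSA-only flag, then the four
--     result lists are built directly (no accumulate-then-dedup pass)."""
--     authorities = [support.get("rule", {}).get("authority", "")
--                    for support in explanation.get("supports", [])]
--     has_ada = any("42 U.S.C." in a for a in authorities)
--     has_flsa = any("29 U.S.C." in a and "42 U.S.C." not in a for a in authorities)
--     return {
--         "applicable_statutes":
--             (["Americans with Disabilities Act (ADA)"] if has_ada else [])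
--             + (["Fair Labor Standards Act (FLSA)"] if has_flsa else []),
--         "key_requirements":
--             (["Interactive process with employee"] if has_ada else [])
--             + (["Time and one-half for overtime hours"] if has_flsa else []),
--         "potential_defenses":
--             (["Undue hardship defense"] if has_ada else [])
--             + (["Employee exempt classification"] if has_flsa else []),
--         "next_steps":
--             (["Engage in interactive process to identify accommodation"] if has_ada else [])
--             + (["Calculate overtime compensation owed"] if has_flsa else []),
--     }
-- ===== Notes on version B (the rewrite author's own statement) =====
-- stated objective: simpler
-- what changed: Instead of appending a quadruple of strings per matching support and then de-duplicating each list via list(set(...)), B computes two boolean flags (any ADA authority; any FLSA-only authority) in single any() scans and builds the four one-or-two-element result lists directly; Pre_ excludes inputs whose supports match both ADA and FLSA, where A's list(set(...)) two-element order is accidental CPython hash order.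
import Mathlib
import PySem

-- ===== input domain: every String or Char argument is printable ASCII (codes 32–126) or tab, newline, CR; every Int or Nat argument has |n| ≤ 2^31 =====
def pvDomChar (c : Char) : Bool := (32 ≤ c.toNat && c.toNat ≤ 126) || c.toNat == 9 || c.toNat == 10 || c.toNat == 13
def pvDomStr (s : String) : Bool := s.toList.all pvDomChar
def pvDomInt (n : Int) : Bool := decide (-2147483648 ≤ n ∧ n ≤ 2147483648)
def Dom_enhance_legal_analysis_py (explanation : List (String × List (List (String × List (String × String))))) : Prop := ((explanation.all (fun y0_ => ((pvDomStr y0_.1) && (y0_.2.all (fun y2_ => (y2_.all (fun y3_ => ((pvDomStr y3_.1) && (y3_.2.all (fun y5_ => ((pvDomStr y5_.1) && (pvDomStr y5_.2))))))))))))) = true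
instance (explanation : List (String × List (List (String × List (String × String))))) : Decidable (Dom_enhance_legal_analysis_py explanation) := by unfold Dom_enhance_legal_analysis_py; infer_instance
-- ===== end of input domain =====

-- ===== PORT A =====
-- B simplifies A's accumulate-then-dedup into two any() flags plus direct list construction; Pre_ excludes
-- the hash-order-dependent mixed ADA+FLSA inputs. (Header objective: simpler.)
def enhance_legal_analysis_py (explanation : List (String × List (List (String × List (String × String))))) : List (String × List String) :=
  let supports := (PySem.Dict.mk explanation).getD "supports" []
  let st := supports.foldl (fun (acc : List String × List String × List String × List String) support =>
    let authority := (PySem.Dict.mk ((PySem.Dict.mk support).getD "rule" [])).getD "authority" ""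
    if PySem.Str.isIn "42 U.S.C." authority then
      (acc.1 ++ ["Americans with Disabilities Act (ADA)"],
       acc.2.1 ++ ["Interactive process with employee"],
       acc.2.2.1 ++ ["Undue hardship defense"],
       acc.2.2.2 ++ ["Engage in interactive process to identify accommodation"])
    else if PySem.Str.isIn "29 U.S.C." authority then
      (acc.1 ++ ["Fair Labor Standards Act (FLSA)"],
       acc.2.1 ++ ["Time and one-half for overtime hours"],
       acc.2.2.1 ++ ["Employee exempt classification"],
       acc.2.2.2 ++ ["Calculate overtime compensation owed"])
    else acc) ([], [], [], [])
  -- list(set(xs)) ported as PySem.Set.ofList: inside Pre_ each list holds copies of a single string,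
  -- so Python's set iteration order is immaterial there
  [("applicable_statutes", PySem.Set.ofList st.1),
   ("key_requirements", PySem.Set.ofList st.2.1),
   ("potential_defenses", PySem.Set.ofList st.2.2.1),
   ("next_steps", PySem.Set.ofList st.2.2.2)]

-- ===== PORT B =====
def enhance_legal_analysis_py_alt (explanation : List (String × List (List (String × List (String × String))))) : List (String × List String) :=
  let authorities := ((PySem.Dict.mk explanation).getD "supports" []).map
    (fun support => (PySem.Dict.mk ((PySem.Dict.mk support).getD "rule" [])).getD "authority" "")
  let has_ada := authorities.any (fun a => PySem.Str.isIn "42 U.S.C." a)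
  let has_flsa := authorities.any (fun a => PySem.Str.isIn "29 U.S.C." a && !PySem.Str.isIn "42 U.S.C." a)
  [("applicable_statutes",
      (if has_ada then ["Americans with Disabilities Act (ADA)"] else [])
      ++ (if has_flsa then ["Fair Labor Standards Act (FLSA)"] else [])),
   ("key_requirements",
      (if has_ada then ["Interactive process with employee"] else [])
      ++ (if has_flsa then ["Time and one-half for overtime hours"] else [])),
   ("potential_defenses",
      (if has_ada then ["Undue hardship defense"] else [])
      ++ (if has_flsa then ["Employee exempt classification"] else [])),
   ("next_steps",
      (if has_ada then ["Engage in interactive process to identify accommodation"] else [])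
      ++ (if has_flsa then ["Calculate overtime compensation owed"] else []))]

-- ===== PRECONDITION & SPEC =====
-- helpers readable without running either port: a support's authority string and the two markers
def pvAuth (support : List (String × List (String × String))) : String :=
  (PySem.Dict.mk ((PySem.Dict.mk support).getD "rule" [])).getD "authority" ""
def pvAda (support : List (String × List (String × String))) : Bool :=
  PySem.Str.isIn "42 U.S.C." (pvAuth support)
def pvFlsaOnly (support : List (String × List (String × String))) : Bool :=
  !PySem.Str.isIn "42 U.S.C." (pvAuth support) && PySem.Str.isIn "29 U.S.C." (pvAuth support)

-- Pre_ excludes inputs whose supports contain both an ADA ("42 U.S.C.") authority and an FLSA-only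
-- ("29 U.S.C." without "42 U.S.C.") authority: on those A's list(set(...)) returns the two entries in
-- CPython's hash-randomized set order, which is accidental and nondeterministic.
def Pre_enhance_legal_analysis_py (explanation : List (String × List (List (String × List (String × String))))) : Prop :=
  ¬((((PySem.Dict.mk explanation).getD "supports" []).any pvAda) = true ∧
    (((PySem.Dict.mk explanation).getD "supports" []).any pvFlsaOnly) = true)
instance (explanation : List (String × List (List (String × List (String × String))))) : Decidable (Pre_enhance_legal_analysis_py explanation) := by unfold Pre_enhance_legal_analysis_py; infer_instance

def pvWitness_enhance_legal_analysis_py : (List (String × List (List (String × List (String × String))))) :=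
  [("supports", [[("rule", [("authority", "42 U.S.C. 12112")])], [("rule", [("authority", "none")])]])]

def Spec_enhance_legal_analysis_py (explanation : List (String × List (List (String × List (String × String))))) (out : List (String × List String)) : Prop := out = enhance_legal_analysis_py_alt explanation
instance (explanation : List (String × List (List (String × List (String × String))))) (out : List (String × List String)) : Decidable (Spec_enhance_legal_analysis_py explanation out) := by unfold Spec_enhance_legal_analysis_py; infer_instance

-- ===== CLAIM (what is proved, stated in full; the proofs are below) =====
def Claim_equal_enhance_legal_analysis_py : Prop := ∀ (explanation : List (String × List (List (String × List (String × String))))), Dom_enhance_legal_analysis_py explanation → Pre_enhance_legal_analysis_py explanation → Spec_enhance_legal_analysis_py explanation (enhance_legal_analysis_py explanation)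

-- ===== LEMMAS AND PROOFS =====

-- the per-support contribution of A's loop to one of the four lists (a = ADA entry, f = FLSA entry)
def pvSel (a f : String) (supports : List (List (String × List (String × String)))) : List String :=
  supports.flatMap (fun s =>
    if PySem.Str.isIn "42 U.S.C." (pvAuth s) then [a]
    else if PySem.Str.isIn "29 U.S.C." (pvAuth s) then [f]
    else [])

-- A's fold, with its accumulator generalized, splits into the four independent pvSel lists
theorem pv_fold_eq (supports : List (List (String × List (String × String))))
    (acc : List String × List String × List String × List String) :
    supports.foldl (fun (acc : List String × List String × List String × List String) support =>
      let authority := (PySem.Dict.mk ((PySem.Dict.mk support).getD "rule" [])).getD "authority" ""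
      if PySem.Str.isIn "42 U.S.C." authority then
        (acc.1 ++ ["Americans with Disabilities Act (ADA)"],
         acc.2.1 ++ ["Interactive process with employee"],
         acc.2.2.1 ++ ["Undue hardship defense"],
         acc.2.2.2 ++ ["Engage in interactive process to identify accommodation"])
      else if PySem.Str.isIn "29 U.S.C." authority then
        (acc.1 ++ ["Fair Labor Standards Act (FLSA)"],
         acc.2.1 ++ ["Time and one-half for overtime hours"],
         acc.2.2.1 ++ ["Employee exempt classification"],
         acc.2.2.2 ++ ["Calculate overtime compensation owed"])
      else acc) acc
    = (acc.1 ++ pvSel "Americans with Disabilities Act (ADA)" "Fair Labor Standards Act (FLSA)" supports,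
       acc.2.1 ++ pvSel "Interactive process with employee" "Time and one-half for overtime hours" supports,
       acc.2.2.1 ++ pvSel "Undue hardship defense" "Employee exempt classification" supports,
       acc.2.2.2 ++ pvSel "Engage in interactive process to identify accommodation" "Calculate overtime compensation owed" supports) := by
  induction supports generalizing acc with
  | nil => simp [pvSel]
  | cons s t ih =>
    simp only [List.foldl_cons, pvSel, pvAuth, List.flatMap_cons]
    split_ifs with h1 h2 <;> rw [ih] <;> simp [pvSel, pvAuth, List.append_assoc]

-- Set.add keeps a one-element set of c fixed when only copies of c are added
theorem pv_foldl_add_const (t : List String) (c : String) (h : ∀ x ∈ t, x = c) :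
    t.foldl PySem.Set.add [c] = [c] := by
  induction t with
  | nil => rfl
  | cons x r ih =>
    have hx : x = c := h x (by simp)
    subst hx
    have hstep : PySem.Set.add [x] x = [x] := by
      simp [PySem.Set.add, PySem.Set.contains]
    rw [List.foldl_cons, hstep]
    exact ih (fun y hy => h y (by simp [hy]))

-- set(xs) of a list whose elements all equal c
theorem pv_ofList_const (l : List String) (c : String) (h : ∀ x ∈ l, x = c) :
    PySem.Set.ofList l = if l = [] then [] else [c] := by
  cases l with
  | nil => rfl
  | cons x t =>
    have hx : x = c := h x (by simp)
    subst hx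
    have h0 : PySem.Set.ofList (x :: t) = t.foldl PySem.Set.add (PySem.Set.add [] x) := by
      simp [PySem.Set.ofList_eq_foldl]
    have hadd : PySem.Set.add ([] : List String) x = [x] := by
      simp [PySem.Set.add, PySem.Set.contains]
    rw [h0, hadd, pv_foldl_add_const t x (fun y hy => h y (by simp [hy]))]
    simp

-- main per-list lemma: under Pre_, dedup of the accumulated list equals B's direct construction
theorem pv_sel_eq (a f : String) (supports : List (List (String × List (String × String))))
    (hPre : ¬((supports.any pvAda) = true ∧ (supports.any pvFlsaOnly) = true)) :
    PySem.Set.ofList (pvSel a f supports)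
      = (if supports.any pvAda then [a] else []) ++ (if supports.any pvFlsaOnly then [f] else []) := by
  by_cases hA : supports.any pvAda = true
  · have hF : supports.any pvFlsaOnly = false := by
      cases hF' : supports.any pvFlsaOnly
      · rfl
      · exact absurd ⟨hA, hF'⟩ hPre
    have hFall : ∀ s ∈ supports, ¬(pvFlsaOnly s = true) := List.any_eq_false.mp hF
    have hall : ∀ x ∈ pvSel a f supports, x = a := by
      intro x hx
      rcases List.mem_flatMap.mp hx with ⟨s, hs, hxs⟩
      by_cases h1 : PySem.Str.isIn "42 U.S.C." (pvAuth s) = true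
      · rw [if_pos h1] at hxs; simpa using hxs
      · have h1' : PySem.Str.isIn "42 U.S.C." (pvAuth s) = false := by
          cases h : PySem.Str.isIn "42 U.S.C." (pvAuth s)
          · rfl
          · exact absurd h h1
        have h29 : ¬(PySem.Str.isIn "29 U.S.C." (pvAuth s) = true) := by
          intro h29
          apply hFall s hs
          simp only [pvFlsaOnly]
          rw [h1', h29]
          rfl
        rw [if_neg h1, if_neg h29] at hxs
        simp at hxs
    have hmem : a ∈ pvSel a f supports := by
      rcases List.any_eq_true.mp hA with ⟨s, hs, hads⟩
      have h1 : PySem.Str.isIn "42 U.S.C." (pvAuth s) = true := hads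
      exact List.mem_flatMap.mpr ⟨s, hs, by rw [if_pos h1]; simp⟩
    have hnil : pvSel a f supports ≠ [] := by
      intro h0; rw [h0] at hmem; simp at hmem
    rw [pv_ofList_const _ a hall, if_neg hnil, if_pos hA,
        if_neg (show ¬(supports.any pvFlsaOnly = true) by rw [hF]; simp)]
    simp
  · have hA' : supports.any pvAda = false := by
      cases h : supports.any pvAda
      · rfl
      · exact absurd h hA
    have hAall : ∀ s ∈ supports, ¬(pvAda s = true) := List.any_eq_false.mp hA'
    have hall : ∀ x ∈ pvSel a f supports, x = f := by
      intro x hx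
      rcases List.mem_flatMap.mp hx with ⟨s, hs, hxs⟩
      have h1 : ¬(PySem.Str.isIn "42 U.S.C." (pvAuth s) = true) := hAall s hs
      rw [if_neg h1] at hxs
      by_cases h29 : PySem.Str.isIn "29 U.S.C." (pvAuth s) = true
      · rw [if_pos h29] at hxs; simpa using hxs
      · rw [if_neg h29] at hxs; simp at hxs
    rw [pv_ofList_const _ f hall, if_neg hA, List.nil_append]
    by_cases hFl : supports.any pvFlsaOnly = true
    · rcases List.any_eq_true.mp hFl with ⟨s, hs, hfs⟩
      have h1 : ¬(PySem.Str.isIn "42 U.S.C." (pvAuth s) = true) := hAall s hs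
      have h1' : PySem.Str.isIn "42 U.S.C." (pvAuth s) = false := by
        cases h : PySem.Str.isIn "42 U.S.C." (pvAuth s)
        · rfl
        · exact absurd h h1
      have h29 : PySem.Str.isIn "29 U.S.C." (pvAuth s) = true := by
        have hfs' := hfs
        simp only [pvFlsaOnly] at hfs'
        rw [h1'] at hfs'
        simpa using hfs'
      have hmem : f ∈ pvSel a f supports :=
        List.mem_flatMap.mpr ⟨s, hs, by rw [if_neg h1, if_pos h29]; simp⟩
      have hnil : pvSel a f supports ≠ [] := by
        intro h0; rw [h0] at hmem; simp at hmem
      rw [if_neg hnil, if_pos hFl]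
    · have hF' : supports.any pvFlsaOnly = false := by
        cases h : supports.any pvFlsaOnly
        · rfl
        · exact absurd h hFl
      have hFall : ∀ s ∈ supports, ¬(pvFlsaOnly s = true) := List.any_eq_false.mp hF'
      have hempty : pvSel a f supports = [] := by
        apply List.flatMap_eq_nil_iff.mpr
        intro s hs
        have h1 : ¬(PySem.Str.isIn "42 U.S.C." (pvAuth s) = true) := hAall s hs
        have h1' : PySem.Str.isIn "42 U.S.C." (pvAuth s) = false := by
          cases h : PySem.Str.isIn "42 U.S.C." (pvAuth s)
          · rfl
          · exact absurd h h1
        have h29 : ¬(PySem.Str.isIn "29 U.S.C." (pvAuth s) = true) := by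
          intro h29
          apply hFall s hs
          simp only [pvFlsaOnly]
          rw [h1', h29]
          rfl
        rw [if_neg h1, if_neg h29]
      rw [hempty, if_pos rfl, if_neg hFl]

-- ===== VERDICT (by name: the statement is the Claim_ definition above) =====
theorem enhance_legal_analysis_py_spec : Claim_equal_enhance_legal_analysis_py := by
  intro expl _ hPre
  unfold Spec_enhance_legal_analysis_py
  unfold Pre_enhance_legal_analysis_py at hPre
  unfold enhance_legal_analysis_py enhance_legal_analysis_py_alt
  simp only []
  rw [pv_fold_eq]
  simp only [List.nil_append]
  rw [pv_sel_eq _ _ _ hPre, pv_sel_eq _ _ _ hPre, pv_sel_eq _ _ _ hPre, pv_sel_eq _ _ _ hPre]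
  simp [List.any_map, Function.comp, pvAda, pvFlsaOnly, pvAuth, Bool.and_comm]
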